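-- pv_equiv track=rewrite | github.com/alexandr50/Sky_pro_corsework3 | utils.py | correct_number_card
-- ===== SOURCE A (Python) =====
-- def correct_number_card(card):
--     """Функция для корректного отображения карты клиента"""
--     if card:
--         number = card[-16:]
--         word = card[:-17]
--         number_for_output = ''
--         for i, j in enumerate(number):
--             if 6 <= i <= 12 and i % 4 != 0:
--                 number_for_output += '*'
--             elif i % 4 == 0 and i != 0:
--                 if 6 <= i <= 11:
--                     number_for_output += ' '
--                     number_for_output += '*'
--                 else:
--                     number_for_output += ' '
--                     number_for_output += j
--             else:
--                 number_for_output += j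
--         return f'{word} {number_for_output}'
--     return ''
-- ===== SOURCE B (Python) =====
-- def correct_number_card(card):
--     """Функция для корректного отображения карты клиента"""
--     if not card:
--         return ''
--     number = card[-16:]
--     word = card[:-17]
--     masked = number[:6] + '*' * len(number[6:12]) + number[12:]
--     grouped = ' '.join(masked[i:i + 4] for i in range(0, len(masked), 4))
--     return f'{word} {grouped}'
-- ===== Notes on version B (the rewrite author's own statement) =====
-- stated objective: simpler
-- what changed: Replaces the single per-character loop with its tangle of index conditions by two independent slicing passes: mask positions 6-11, then regroup into blocks of four with join.
import Mathlib
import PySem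

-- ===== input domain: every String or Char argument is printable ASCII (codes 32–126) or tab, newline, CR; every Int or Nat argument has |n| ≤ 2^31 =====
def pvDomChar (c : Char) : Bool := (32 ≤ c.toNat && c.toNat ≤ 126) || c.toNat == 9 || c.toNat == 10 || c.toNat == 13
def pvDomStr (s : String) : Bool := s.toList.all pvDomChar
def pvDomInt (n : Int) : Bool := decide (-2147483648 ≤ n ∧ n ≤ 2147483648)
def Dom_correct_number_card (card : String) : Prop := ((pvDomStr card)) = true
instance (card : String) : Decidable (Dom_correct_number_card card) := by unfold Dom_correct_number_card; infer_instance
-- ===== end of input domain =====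

-- B replaces A's single per-character masking loop by two independent slicing passes (mask 6..11, then regroup in blocks of four); objective: simpler.


-- ===== PORT A =====
-- per-character loop over enumerate(number), exactly A's branch order
def pvLoopA (number : List Char) : List Char :=
  (PySem.List.enumerate number 0).foldl (fun acc p =>
    if 6 ≤ p.1 ∧ p.1 ≤ 12 ∧ PySem.Int.mod p.1 4 ≠ 0 then acc ++ ['*']
    else if PySem.Int.mod p.1 4 = 0 ∧ p.1 ≠ 0 then
      (if 6 ≤ p.1 ∧ p.1 ≤ 11 then (acc ++ [' ']) ++ ['*'] else (acc ++ [' ']) ++ [p.2])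
    else acc ++ [p.2]) []

def correct_number_card (card : String) : String :=
  let cs := card.toList
  if cs ≠ [] then
    let number := PySem.List.slice cs (some (-16)) none
    let word := PySem.List.slice cs none (some (-17))
    String.ofList (word ++ [' '] ++ pvLoopA number)
  else ""

-- ===== PORT B =====
def correct_number_card_alt (card : String) : String :=
  let cs := card.toList
  if cs = [] then "" else
    let number := PySem.List.slice cs (some (-16)) none
    let word := PySem.List.slice cs none (some (-17))
    let masked := PySem.List.slice number none (some 6)
      ++ List.replicate (PySem.List.slice number (some 6) (some 12)).length '*'
      ++ PySem.List.slice number (some 12) none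
    let grouped := PySem.Chars.join [' ']
      ((PySem.List.pyRange 0 masked.length 4).map
        (fun i => PySem.List.slice masked (some i) (some (i + 4))))
    String.ofList (word ++ [' '] ++ grouped)
-- ===== PRECONDITION & SPEC =====
def Spec_correct_number_card (card : String) (out : String) : Prop := out = correct_number_card_alt card
instance (card : String) (out : String) : Decidable (Spec_correct_number_card card out) := by unfold Spec_correct_number_card; infer_instance

-- ===== CLAIM (what is proved, stated in full; the proofs are below) =====
def Claim_equal_correct_number_card : Prop := ∀ (card : String), Dom_correct_number_card card → Spec_correct_number_card card (correct_number_card card)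


-- ===== LEMMAS AND PROOFS =====
-- the two passes of B agree with A's loop on every number of length ≤ 16 (the case for card[-16:])
set_option maxHeartbeats 2000000 in
lemma pvLoopA_eq (cs : List Char) (h : cs.length ≤ 16) :
    pvLoopA cs = PySem.Chars.join [' ']
      ((PySem.List.pyRange 0 (PySem.List.slice cs none (some 6)
          ++ List.replicate (PySem.List.slice cs (some 6) (some 12)).length '*'
          ++ PySem.List.slice cs (some 12) none).length 4).map
        (fun i => PySem.List.slice (PySem.List.slice cs none (some 6)
          ++ List.replicate (PySem.List.slice cs (some 6) (some 12)).length '*'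
          ++ PySem.List.slice cs (some 12) none) (some i) (some (i + 4)))) := by
  match cs with
  | [] => simp [pvLoopA, PySem.List.enumerate_cons, PySem.List.enumerate_nil, PySem.List.slice, PySem.List.clampIdx, PySem.Chars.join, PySem.List.pyRange, PySem.Int.mod, List.intercalate, List.range_succ]
  | [c0] => simp [pvLoopA, PySem.List.enumerate_cons, PySem.List.enumerate_nil, PySem.List.slice, PySem.List.clampIdx, PySem.Chars.join, PySem.List.pyRange, PySem.Int.mod, List.intercalate, List.range_succ]
  | [c0, c1] => simp [pvLoopA, PySem.List.enumerate_cons, PySem.List.enumerate_nil, PySem.List.slice, PySem.List.clampIdx, PySem.Chars.join, PySem.List.pyRange, PySem.Int.mod, List.intercalate, List.range_succ]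
  | [c0, c1, c2] => simp [pvLoopA, PySem.List.enumerate_cons, PySem.List.enumerate_nil, PySem.List.slice, PySem.List.clampIdx, PySem.Chars.join, PySem.List.pyRange, PySem.Int.mod, List.intercalate, List.range_succ]
  | [c0, c1, c2, c3] => simp [pvLoopA, PySem.List.enumerate_cons, PySem.List.enumerate_nil, PySem.List.slice, PySem.List.clampIdx, PySem.Chars.join, PySem.List.pyRange, PySem.Int.mod, List.intercalate, List.range_succ]
  | [c0, c1, c2, c3, c4] => simp [pvLoopA, PySem.List.enumerate_cons, PySem.List.enumerate_nil, PySem.List.slice, PySem.List.clampIdx, PySem.Chars.join, PySem.List.pyRange, PySem.Int.mod, List.intercalate, List.range_succ]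
  | [c0, c1, c2, c3, c4, c5] => simp [pvLoopA, PySem.List.enumerate_cons, PySem.List.enumerate_nil, PySem.List.slice, PySem.List.clampIdx, PySem.Chars.join, PySem.List.pyRange, PySem.Int.mod, List.intercalate, List.range_succ]
  | [c0, c1, c2, c3, c4, c5, c6] => simp [pvLoopA, PySem.List.enumerate_cons, PySem.List.enumerate_nil, PySem.List.slice, PySem.List.clampIdx, PySem.Chars.join, PySem.List.pyRange, PySem.Int.mod, List.intercalate, List.range_succ]
  | [c0, c1, c2, c3, c4, c5, c6, c7] => simp [pvLoopA, PySem.List.enumerate_cons, PySem.List.enumerate_nil, PySem.List.slice, PySem.List.clampIdx, PySem.Chars.join, PySem.List.pyRange, PySem.Int.mod, List.intercalate, List.range_succ]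
  | [c0, c1, c2, c3, c4, c5, c6, c7, c8] => simp [pvLoopA, PySem.List.enumerate_cons, PySem.List.enumerate_nil, PySem.List.slice, PySem.List.clampIdx, PySem.Chars.join, PySem.List.pyRange, PySem.Int.mod, List.intercalate, List.range_succ]
  | [c0, c1, c2, c3, c4, c5, c6, c7, c8, c9] => simp [pvLoopA, PySem.List.enumerate_cons, PySem.List.enumerate_nil, PySem.List.slice, PySem.List.clampIdx, PySem.Chars.join, PySem.List.pyRange, PySem.Int.mod, List.intercalate, List.range_succ]
  | [c0, c1, c2, c3, c4, c5, c6, c7, c8, c9, c10] => simp [pvLoopA, PySem.List.enumerate_cons, PySem.List.enumerate_nil, PySem.List.slice, PySem.List.clampIdx, PySem.Chars.join, PySem.List.pyRange, PySem.Int.mod, List.intercalate, List.range_succ]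
  | [c0, c1, c2, c3, c4, c5, c6, c7, c8, c9, c10, c11] => simp [pvLoopA, PySem.List.enumerate_cons, PySem.List.enumerate_nil, PySem.List.slice, PySem.List.clampIdx, PySem.Chars.join, PySem.List.pyRange, PySem.Int.mod, List.intercalate, List.range_succ]
  | [c0, c1, c2, c3, c4, c5, c6, c7, c8, c9, c10, c11, c12] => simp [pvLoopA, PySem.List.enumerate_cons, PySem.List.enumerate_nil, PySem.List.slice, PySem.List.clampIdx, PySem.Chars.join, PySem.List.pyRange, PySem.Int.mod, List.intercalate, List.range_succ]
  | [c0, c1, c2, c3, c4, c5, c6, c7, c8, c9, c10, c11, c12, c13] => simp [pvLoopA, PySem.List.enumerate_cons, PySem.List.enumerate_nil, PySem.List.slice, PySem.List.clampIdx, PySem.Chars.join, PySem.List.pyRange, PySem.Int.mod, List.intercalate, List.range_succ]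
  | [c0, c1, c2, c3, c4, c5, c6, c7, c8, c9, c10, c11, c12, c13, c14] => simp [pvLoopA, PySem.List.enumerate_cons, PySem.List.enumerate_nil, PySem.List.slice, PySem.List.clampIdx, PySem.Chars.join, PySem.List.pyRange, PySem.Int.mod, List.intercalate, List.range_succ]
  | [c0, c1, c2, c3, c4, c5, c6, c7, c8, c9, c10, c11, c12, c13, c14, c15] => simp [pvLoopA, PySem.List.enumerate_cons, PySem.List.enumerate_nil, PySem.List.slice, PySem.List.clampIdx, PySem.Chars.join, PySem.List.pyRange, PySem.Int.mod, List.intercalate, List.range_succ]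
  | c0::c1::c2::c3::c4::c5::c6::c7::c8::c9::c10::c11::c12::c13::c14::c15::c16::rest => simp at h; omega

-- ===== VERDICT (by name: the statement is the Claim_ definition above) =====
theorem correct_number_card_spec : Claim_equal_correct_number_card := by
  intro card _
  unfold Spec_correct_number_card correct_number_card correct_number_card_alt
  by_cases hc : card.toList = []
  · simp [hc]
  · simp only [hc, ne_eq, not_false_eq_true, if_true, if_false]
    have hlen : (PySem.List.slice card.toList (some (-16)) none).length ≤ 16 := by
      rw [PySem.List.slice_some_none]
      simp [List.length_drop]
      omega
    rw [pvLoopA_eq _ hlen]
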